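-- pv_equiv track=rewrite | github.com/bougzy/narmonix-studio | services/ai/harmony.py | _fit_to_range
-- ===== SOURCE A (Python) =====
-- def _fit_to_range(midi_note: int, low: int, high: int) -> int:
--     """Fit a MIDI note into the specified range by octave transposition."""
--     if midi_note <= 0:
--         return 0
--
--     while midi_note < low:
--         midi_note += 12
--     while midi_note > high:
--         midi_note -= 12
--
--     # Clamp to range
--     return max(low, min(high, midi_note))
-- ===== SOURCE B (Python) =====
-- def _fit_to_range(midi_note: int, low: int, high: int) -> int:
--     if midi_note <= 0:
--         return 0
--     # closed form for the two octave-shift loops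
--     k = max(0, -((midi_note - low) // 12))   # ceil((low - midi_note)/12)
--     m1 = midi_note + 12 * k
--     j = max(0, -((high - m1) // 12))         # ceil((m1 - high)/12)
--     m2 = m1 - 12 * j
--     return max(low, min(high, m2))
-- ===== Notes on version B (the rewrite author's own statement) =====
-- stated objective: simpler
-- what changed: Replaced the two octave while-loops by closed-form ceiling-division shift counts (k upward, j downward) with the same final clamp.
import Mathlib
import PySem

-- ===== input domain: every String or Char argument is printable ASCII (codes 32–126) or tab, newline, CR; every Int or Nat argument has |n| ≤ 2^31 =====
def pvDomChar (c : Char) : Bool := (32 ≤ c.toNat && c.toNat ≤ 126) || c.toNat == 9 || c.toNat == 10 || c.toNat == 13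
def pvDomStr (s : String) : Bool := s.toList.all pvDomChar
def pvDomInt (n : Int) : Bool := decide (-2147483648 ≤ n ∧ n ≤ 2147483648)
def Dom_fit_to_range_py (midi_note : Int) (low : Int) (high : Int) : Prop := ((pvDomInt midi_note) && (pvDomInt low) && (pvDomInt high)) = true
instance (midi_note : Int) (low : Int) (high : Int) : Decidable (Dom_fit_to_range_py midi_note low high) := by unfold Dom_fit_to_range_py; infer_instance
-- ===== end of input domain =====

-- B replaces the two octave-shift while-loops by closed-form ceiling-division shift counts (objective: simpler).


-- ===== PORT A =====
-- `while midi_note < low: midi_note += 12`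
def fitUpLoop (midi_note : Int) (low : Int) : Int :=
  if midi_note < low then fitUpLoop (midi_note + 12) low else midi_note
termination_by (low - midi_note).toNat
decreasing_by omega

-- `while midi_note > high: midi_note -= 12`
def fitDownLoop (midi_note : Int) (high : Int) : Int :=
  if midi_note > high then fitDownLoop (midi_note - 12) high else midi_note
termination_by (midi_note - high).toNat
decreasing_by omega

def fit_to_range_py (midi_note : Int) (low : Int) (high : Int) : Int :=
  if midi_note ≤ 0 then 0
  else max low (min high (fitDownLoop (fitUpLoop midi_note low) high))

-- ===== PORT B =====
def fit_to_range_py_alt (midi_note : Int) (low : Int) (high : Int) : Int :=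
  if midi_note ≤ 0 then 0
  else
    let k := max 0 (-(PySem.Int.floordiv (midi_note - low) 12))
    let m1 := midi_note + 12 * k
    let j := max 0 (-(PySem.Int.floordiv (high - m1) 12))
    let m2 := m1 - 12 * j
    max low (min high m2)

-- ===== PRECONDITION & SPEC =====
def Spec_fit_to_range_py (midi_note : Int) (low : Int) (high : Int) (out : Int) : Prop := out = fit_to_range_py_alt midi_note low high
instance (midi_note : Int) (low : Int) (high : Int) (out : Int) : Decidable (Spec_fit_to_range_py midi_note low high out) := by unfold Spec_fit_to_range_py; infer_instance

-- ===== CLAIM (what is proved, stated in full; the proofs are below) =====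
def Claim_equal_fit_to_range_py : Prop := ∀ (midi_note : Int) (low : Int) (high : Int), Dom_fit_to_range_py midi_note low high → Spec_fit_to_range_py midi_note low high (fit_to_range_py midi_note low high)

-- ===== LEMMAS AND PROOFS =====
theorem fitUpLoop_closed (midi_note low : Int) :
    fitUpLoop midi_note low = midi_note + 12 * max 0 (-((midi_note - low) / 12)) := by
  fun_induction fitUpLoop midi_note low with
  | case1 n h ih =>
    rw [ih]
    omega
  | case2 n h =>
    omega

theorem fitDownLoop_closed (midi_note high : Int) :
    fitDownLoop midi_note high = midi_note - 12 * max 0 (-((high - midi_note) / 12)) := by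
  fun_induction fitDownLoop midi_note high with
  | case1 n h ih =>
    rw [ih]
    omega
  | case2 n h =>
    omega

-- ===== VERDICT (by name: the statement is the Claim_ definition above) =====
theorem fit_to_range_py_spec : Claim_equal_fit_to_range_py := by
  intro n low high _
  unfold Spec_fit_to_range_py fit_to_range_py fit_to_range_py_alt
  rw [fitUpLoop_closed, fitDownLoop_closed]
  simp only [PySem.Int.floordiv_eq_ediv_of_pos (show (0:Int) < 12 by norm_num)]
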